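-- pv_equiv track=rewrite | github.com/weibin666/hw-kexin | hw/双指针/06_魔法塔的全视之眼.py | max_prorect
-- ===== SOURCE A (Python) =====
-- from typing import List
--
-- def max_prorect(mat: List[str]) -> int:
--     # 获取地图的行数 n 和列数 m
--     n, m = len(mat), len(mat[0])
--
--     # 初始化两个辅助数组，分别用于记录每个位置在行方向和列方向可以监控到的旅人数
--     sx = [[0 for _ in range(m)] for _ in range(n)]  # 行方向
--     sy = [[0 for _ in range(m)] for _ in range(n)]  # 列方向
--
--     # 遍历每一行，预处理每个位置在该行中能监控到的旅人数
--     for i in range(n):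
--         j = 0
--         while j < m:
--             if mat[i][j] == 'B':
--                 # 遇到屏障则跳过，屏障后续部分将重新计数
--                 j += 1
--             else:
--                 # 从当前 j 开始向右遍历直到遇到屏障或行尾，统计中间出现的旅人数
--                 k = j
--                 cnt = 0
--                 while k < m and mat[i][k] != 'B':
--                     cnt += (mat[i][k] == 'C')  # 是旅人则计数加一
--                     k += 1
--                 # 将该段区间 [j, k) 内的所有位置都赋值为统计到的旅人数
--                 for p in range(j, k):
--                     sx[i][p] = cnt
--                 j = k  # 跳过该段
--
--     # 遍历每一列，预处理每个位置在该列中能监控到的旅人数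
--     for j in range(m):
--         i = 0
--         while i < n:
--             if mat[i][j] == 'B':
--                 # 遇到屏障则跳过，屏障下方部分将重新计数
--                 i += 1
--             else:
--                 # 从当前 i 开始向下遍历直到遇到屏障或列底，统计中间出现的旅人数
--                 k = i
--                 cnt = 0
--                 while k < n and mat[k][j] != 'B':
--                     cnt += (mat[k][j] == 'C')  # 是旅人则计数加一
--                     k += 1
--                 # 将该段区间 [i, k) 内的所有位置都赋值为统计到的旅人数
--                 for p in range(i, k):
--                     sy[p][j] = cnt
--                 i = k  # 跳过该段
--
--     # 遍历地图，查找所有魔法塔 'A' 所在位置，计算其可监控的旅人数（行+列方向）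
--     ans = 0
--     for i in range(n):
--         for j in range(m):
--             if mat[i][j] == 'A':
--                 # 对于每个魔法塔，取其行方向和列方向的总监控旅人数
--                 ans = max(ans, sx[i][j] + sy[i][j])  # 更新最大值
--
--     return ans  # 返回所有魔法塔中能监控最多旅人的值
-- ===== SOURCE B (Python) =====
-- from typing import List
--
-- def max_prorect(mat: List[str]) -> int:
--     # Simpler: no precomputed tables; for each tower 'A' scan its row and column directly.
--     n, m = len(mat), len(mat[0])
--     best = 0
--     for i in range(n):
--         for j in range(m):
--             if mat[i][j] == 'A':
--                 total = 0
--                 jj = j - 1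
--                 while jj >= 0 and mat[i][jj] != 'B':
--                     total += mat[i][jj] == 'C'
--                     jj -= 1
--                 jj = j + 1
--                 while jj < m and mat[i][jj] != 'B':
--                     total += mat[i][jj] == 'C'
--                     jj += 1
--                 ii = i - 1
--                 while ii >= 0 and mat[ii][j] != 'B':
--                     total += mat[ii][j] == 'C'
--                     ii -= 1
--                 ii = i + 1
--                 while ii < n and mat[ii][j] != 'B':
--                     total += mat[ii][j] == 'C'
--                     ii += 1
--                 if total > best:
--                     best = total
--     return best
-- ===== Notes on version B (the rewrite author's own statement) =====
-- stated objective: simpler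
-- what changed: Dropped the sx/sy segment-fill precomputation tables entirely; B finds each 'A' cell and directly scans left/right in its row and up/down in its column, counting 'C' until a 'B' or the grid edge, keeping a running max.
import Mathlib
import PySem

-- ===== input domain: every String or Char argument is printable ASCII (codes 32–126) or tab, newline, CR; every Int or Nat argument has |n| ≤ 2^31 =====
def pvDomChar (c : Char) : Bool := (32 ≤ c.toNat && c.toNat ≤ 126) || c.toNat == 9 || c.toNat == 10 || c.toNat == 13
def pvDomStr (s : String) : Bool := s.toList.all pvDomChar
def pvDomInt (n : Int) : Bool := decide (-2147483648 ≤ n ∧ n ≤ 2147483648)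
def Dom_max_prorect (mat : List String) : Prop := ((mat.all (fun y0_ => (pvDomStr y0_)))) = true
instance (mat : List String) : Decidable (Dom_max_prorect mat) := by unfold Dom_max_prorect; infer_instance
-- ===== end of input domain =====

-- B drops A's sx/sy precomputation tables and, for each 'A' cell, scans its row and column
-- directly, counting 'C' until a 'B' or the edge (objective: simpler; no speed claim).

-- ===== PORT A =====
-- A's row/column pass: repeatedly skip a 'B' (its table entry stays 0) or take the whole
-- barrier-free segment, count its 'C's, and write that count at every position of the segment.
def rowFill (l : List Char) : List Int :=
  match l with
  | [] => []
  | c :: rest =>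
    if c = 'B' then 0 :: rowFill rest
    else
      let seg := List.takeWhile (fun x => x != 'B') (c :: rest)
      (seg.map (fun _ => (seg.count 'C' : Int))) ++
        rowFill (List.dropWhile (fun x => x != 'B') (c :: rest))
termination_by l.length
decreasing_by
  all_goals simp_all
  have h := List.length_dropWhile_le (fun x : Char => x != 'B') rest
  omega

def max_prorect (mat : List String) : Int :=
  let n := mat.length
  let m := (mat.headD "").toList.length
  let rows := mat.map (fun r => r.toList.take m)
  let sx := rows.map rowFill
  let sy := (List.range m).map (fun j => rowFill (rows.map (fun r => r.getD j ' ')))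
  (List.range n).foldl (fun acc i =>
    (List.range m).foldl (fun acc j =>
      if (rows.getD i []).getD j ' ' = 'A' then
        max acc ((sx.getD i []).getD j 0 + (sy.getD j []).getD i 0)
      else acc) acc) 0

-- ===== PORT B =====
-- one directed scan of B: count 'C' until a 'B' or the end of the list
def scanC (l : List Char) : Int := ((List.takeWhile (fun x => x != 'B') l).count 'C' : Int)

def max_prorect_alt (mat : List String) : Int :=
  let n := mat.length
  let m := (mat.headD "").toList.length
  let rows := mat.map (fun r => r.toList.take m)
  (List.range n).foldl (fun acc i =>
    (List.range m).foldl (fun acc j =>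
      let row := rows.getD i []
      if row.getD j ' ' = 'A' then
        let col := rows.map (fun r => r.getD j ' ')
        max acc (scanC (row.take j).reverse + scanC (row.drop (j+1)) +
                 scanC (col.take i).reverse + scanC (col.drop (i+1)))
      else acc) acc) 0

-- ===== PRECONDITION & SPEC =====
-- Pre_ excludes exactly the inputs where the Python A raises IndexError: the empty grid
-- (mat[0]) and grids with a row shorter than the first row (mat[i][j] for j < m).
def Pre_max_prorect (mat : List String) : Prop :=
  mat ≠ [] ∧ ∀ s ∈ mat, (mat.headD "").toList.length ≤ s.toList.length
instance (mat : List String) : Decidable (Pre_max_prorect mat) := by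
  unfold Pre_max_prorect; infer_instance

def pvWitness_max_prorect : List String := (["CAC", "CBC", "ACB"])

def Spec_max_prorect (mat : List String) (out : Int) : Prop := out = max_prorect_alt mat
instance (mat : List String) (out : Int) : Decidable (Spec_max_prorect mat out) := by
  unfold Spec_max_prorect; infer_instance

-- ===== CLAIM (what is proved, stated in full; the proofs are below) =====
def Claim_equal_max_prorect : Prop := ∀ (mat : List String), Dom_max_prorect mat → Pre_max_prorect mat → Spec_max_prorect mat (max_prorect mat)

-- ===== LEMMAS AND PROOFS =====

lemma takeWhile_append_B (xs ys : List Char) :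
    List.takeWhile (fun x => x != 'B') (xs ++ 'B' :: ys) =
      List.takeWhile (fun x => x != 'B') xs := by
  induction xs with
  | nil => simp
  | cons x xs ih =>
    by_cases hx : x = 'B' <;> simp [hx, ih]

lemma scanC_append_B (xs ys : List Char) : scanC (xs ++ 'B' :: ys) = scanC xs := by
  simp [scanC, takeWhile_append_B]

lemma scanC_all (l : List Char) (h : ∀ x ∈ l, x ≠ 'B') : scanC l = (l.count 'C' : Int) := by
  have : List.takeWhile (fun x => x != 'B') l = l := by
    apply List.takeWhile_eq_self_iff.mpr
    intro x hx; simpa using h x hx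
  simp [scanC, this]

lemma rowFill_getD (l : List Char) : ∀ (j : Nat), j < l.length → l.getD j ' ' ≠ 'B' →
    (rowFill l).getD j 0 =
      scanC (l.take j).reverse + (if l.getD j ' ' = 'C' then 1 else 0) +
        scanC (l.drop (j+1)) := by
  induction l using rowFill.induct with
  | case1 => intro j hj _; simp at hj
  | case2 rest ih =>
    intro j hj hB
    match j with
    | 0 => simp at hB
    | Nat.succ jn =>
      have hjn : jn < rest.length := by simpa using hj
      have hB' : rest.getD jn ' ' ≠ 'B' := by simpa using hB
      rw [rowFill]
      rw [if_pos rfl]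
      show (rowFill rest).getD jn 0 =
        scanC (('B' :: rest.take jn).reverse) + (if rest.getD jn ' ' = 'C' then 1 else 0) +
          scanC (rest.drop (jn+1))
      rw [ih jn hjn hB', List.reverse_cons, scanC_append_B]
  | case3 c rest h ih =>
    intro j hj hB
    obtain ⟨seg, hseg⟩ : ∃ seg, List.takeWhile (fun x : Char => x != 'B') (c :: rest) = seg :=
      ⟨_, rfl⟩
    obtain ⟨d, hd⟩ : ∃ d, List.dropWhile (fun x : Char => x != 'B') (c :: rest) = d := ⟨_, rfl⟩
    rw [hd] at ih
    have hsplit : seg ++ d = c :: rest := by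
      rw [← hseg, ← hd]; exact List.takeWhile_append_dropWhile
    have hlen : seg.length + d.length = rest.length + 1 := by
      have hc := congrArg List.length hsplit; simpa using hc
    have hsegmem : ∀ x ∈ seg, x ≠ 'B' := by
      intro x hx
      have hm := List.mem_takeWhile_imp (p := fun x : Char => x != 'B') (l := c :: rest)
        (by rw [hseg]; exact hx)
      simpa using hm
    have hdB : ∀ b d', d = b :: d' → b = 'B' := by
      intro b d' hdd
      have hne : List.dropWhile (fun x : Char => x != 'B') (c :: rest) ≠ [] := by
        rw [hd, hdd]; simp
      have h0 := List.head_dropWhile_not (fun x : Char => x != 'B') (l := c :: rest) hne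
      have h1 : (List.dropWhile (fun x : Char => x != 'B') (c :: rest)).head? = some b := by
        rw [hd, hdd]; rfl
      rw [List.head?_eq_some_head hne, Option.some_inj] at h1
      rw [h1] at h0
      simpa using h0
    have hrw : rowFill (c :: rest) = (seg.map (fun _ => (seg.count 'C' : Int))) ++ rowFill d := by
      rw [rowFill]
      rw [if_neg h, hseg, hd]
    rcases lt_trichotomy j seg.length with hcase | hcase | hcase
    · -- j inside the barrier-free segment
      have htake : (c :: rest).take j = seg.take j := by
        rw [← hsplit, List.take_append, Nat.sub_eq_zero_of_le (Nat.le_of_lt hcase)]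
        simp
      have hdrop : (c :: rest).drop (j+1) = seg.drop (j+1) ++ d := by
        rw [← hsplit, List.drop_append, Nat.sub_eq_zero_of_le hcase]
        simp
      have hget : (c :: rest).getD j ' ' = seg.getD j ' ' := by
        rw [← hsplit, List.getD_append _ _ _ _ hcase]
      have hLHS : (rowFill (c :: rest)).getD j 0 = (seg.count 'C' : Int) := by
        rw [hrw, List.getD_append _ _ _ _ (by simpa using hcase),
            List.getD_eq_getElem _ _ (by simpa using hcase), List.getElem_map]
      have h1 : scanC (seg.take j).reverse = ((seg.take j).count 'C' : Int) := by
        rw [scanC_all _ (fun x hx => hsegmem x (List.mem_of_mem_take (List.mem_reverse.mp hx)))]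
        simp [List.count_reverse]
      have h2 : scanC (seg.drop (j+1) ++ d) = ((seg.drop (j+1)).count 'C' : Int) := by
        rcases d with _ | ⟨b, d'⟩
        · rw [List.append_nil]
          exact scanC_all _ (fun x hx => hsegmem x (List.mem_of_mem_drop hx))
        · have hb := hdB b d' rfl
          subst hb
          rw [scanC_append_B]
          exact scanC_all _ (fun x hx => hsegmem x (List.mem_of_mem_drop hx))
      rw [hLHS, htake, hdrop, hget, h1, h2]
      have hsplit2 : seg = seg.take j ++ seg[j]'hcase :: seg.drop (j+1) := by
        conv_lhs => rw [← List.take_append_drop j seg]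
        congr 1
        exact (List.getElem_cons_drop hcase).symm
      have hgd : seg.getD j ' ' = seg[j]'hcase := List.getD_eq_getElem _ _ hcase
      rw [hgd]
      have hcount : seg.count 'C' = (seg.take j).count 'C' +
          ((if seg[j]'hcase = 'C' then 1 else 0) + (seg.drop (j+1)).count 'C') := by
        conv_lhs => rw [hsplit2]
        rw [List.count_append, List.count_cons]
        by_cases hC : seg[j]'hcase = 'C' <;> simp [hC] <;> omega
      rw [hcount]
      push_cast
      ring
    · -- j is exactly the barrier position: contradiction with hB
      exfalso
      rcases d with _ | ⟨b, d'⟩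
      · simp at hlen hj; omega
      · have hb := hdB b d' rfl
        subst hb
        apply hB
        rw [← hsplit, List.getD_append_right _ _ _ _ (le_of_eq hcase.symm)]
        rw [show j - seg.length = 0 from by omega]
        rfl
    · -- j strictly beyond the segment: step into the recursive call on d
      rcases d with _ | ⟨b, d'⟩
      · exfalso; simp at hlen hj; omega
      · have hb := hdB b d' rfl
        subst hb
        obtain ⟨k, hk⟩ : ∃ k, j = seg.length + (k + 1) := ⟨j - seg.length - 1, by omega⟩
        subst hk
        have hkd : k + 1 < ('B' :: d').length := by
          simp only [List.length_cons] at hj hlen ⊢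
          omega
        have hgetk : ('B' :: d').getD (k+1) ' ' = (c :: rest).getD (seg.length + (k + 1)) ' ' := by
          rw [← hsplit, List.getD_append_right _ _ _ _ (by omega),
              show seg.length + (k + 1) - seg.length = k + 1 from by omega]
        have hIH := ih (k+1) hkd (by rw [hgetk]; exact hB)
        rw [show ('B' :: d').take (k+1) = 'B' :: d'.take k from rfl, List.reverse_cons,
            scanC_append_B,
            show ('B' :: d').drop (k+1+1) = d'.drop (k+1) from rfl,
            List.getD_cons_succ] at hIH
        have hLHS : (rowFill (c :: rest)).getD (seg.length + (k + 1)) 0 =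
            (rowFill ('B' :: d')).getD (k+1) 0 := by
          rw [hrw, List.getD_append_right _ _ _ _ (by simp),
              show seg.length + (k + 1) - (seg.map (fun _ => (seg.count 'C' : Int))).length = k + 1
                from by simp]
        have htake : ((c :: rest).take (seg.length + (k + 1))).reverse =
            (d'.take k).reverse ++ 'B' :: seg.reverse := by
          rw [← hsplit, List.take_append, List.take_of_length_le (by omega),
              show seg.length + (k + 1) - seg.length = k + 1 from by omega,
              show ('B' :: d').take (k+1) = 'B' :: d'.take k from rfl]
          simp
        have hdrop : (c :: rest).drop (seg.length + (k + 1) + 1) = d'.drop (k+1) := by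
          rw [← hsplit, List.drop_append, List.drop_of_length_le (by omega),
              show seg.length + (k + 1) + 1 - seg.length = k + 1 + 1 from by omega]
          simp
        have hchar : (c :: rest).getD (seg.length + (k + 1)) ' ' = d'.getD k ' ' := by
          rw [← hgetk]
          exact List.getD_cons_succ
        rw [hLHS, hIH, htake, hdrop, hchar, scanC_append_B]

-- pointwise equality of the two per-cell computations, under Pre_
lemma cell_eq (mat : List String) (hpre : Pre_max_prorect mat) (i j : Nat)
    (hi : i < mat.length) (hj : j < (mat.headD "").toList.length)
    (hA : ((mat.map (fun r => r.toList.take (mat.headD "").toList.length)).getD i []).getD j ' ' = 'A') :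
    (((mat.map (fun r => r.toList.take (mat.headD "").toList.length)).map rowFill).getD i []).getD j 0 +
      (((List.range (mat.headD "").toList.length).map
          (fun j => rowFill ((mat.map (fun r => r.toList.take (mat.headD "").toList.length)).map
            (fun r => r.getD j ' ')))).getD j []).getD i 0 =
    scanC (((mat.map (fun r => r.toList.take (mat.headD "").toList.length)).getD i []).take j).reverse +
      scanC (((mat.map (fun r => r.toList.take (mat.headD "").toList.length)).getD i []).drop (j+1)) +
      scanC (((mat.map (fun r => r.toList.take (mat.headD "").toList.length)).map
        (fun r => r.getD j ' ')).take i).reverse +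
      scanC (((mat.map (fun r => r.toList.take (mat.headD "").toList.length)).map
        (fun r => r.getD j ' ')).drop (i+1)) := by
  obtain ⟨hne, hlen⟩ := hpre
  set m := (mat.headD "").toList.length with hm
  set rows := mat.map (fun r => r.toList.take m) with hrows
  have hrowslen : rows.length = mat.length := by simp [hrows]
  have hi' : i < rows.length := by omega
  rw [List.getD_eq_getElem rows [] hi'] at hA ⊢
  set row := rows[i] with hrow
  set col := rows.map (fun r => r.getD j ' ') with hcol
  have hrowlen : row.length = m := by
    have hmem : row ∈ rows := List.getElem_mem hi'
    rw [hrows] at hmem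
    obtain ⟨s, hs, hrow_eq⟩ := List.mem_map.mp hmem
    rw [← hrow_eq, List.length_take]
    have := hlen s hs
    omega
  have hcollen : col.length = mat.length := by simp [hcol, hrowslen]
  have hcolget : col.getD i ' ' = row.getD j ' ' := by
    rw [hcol, List.getD_eq_getElem _ _ (by rw [List.length_map]; exact hi'), List.getElem_map]
  have hsx : ((rows.map rowFill).getD i []) = rowFill row := by
    rw [List.getD_eq_getElem _ _ (by rw [List.length_map]; exact hi'), List.getElem_map]
  have hsy : (((List.range m).map (fun j => rowFill (rows.map (fun r => r.getD j ' ')))).getD j [])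
      = rowFill col := by
    rw [PySem.List.getD_map_range _ _ _ _ hj]
  rw [hsx, hsy]
  have h1 := rowFill_getD row j (by omega) (by rw [hA]; decide)
  have h2 := rowFill_getD col i (by omega) (by rw [hcolget, hA]; decide)
  rw [h1, h2, hcolget, hA, show (if ('A' : Char) = 'C' then (1:Int) else 0) = 0 from by decide]
  ring

-- ===== VERDICT (by name: the statement is the Claim_ definition above) =====
theorem max_prorect_spec : Claim_equal_max_prorect := by
  intro mat _ hpre
  unfold Spec_max_prorect
  simp only [max_prorect, max_prorect_alt]
  apply PySem.List.foldl_congr_mem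
  intro acc i hi
  apply PySem.List.foldl_congr_mem
  intro acc' j hj
  rw [List.mem_range] at hi hj
  by_cases hA : ((mat.map (fun r => r.toList.take (mat.headD "").toList.length)).getD i []).getD j ' ' = 'A'
  · rw [if_pos hA, if_pos hA]
    rw [cell_eq mat hpre i j hi hj hA]
  · rw [if_neg hA, if_neg hA]
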